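-- pv_equiv track=rewrite | github.com/AleksandrGolovin/Sprint_1 | additional_task_1.py | get_unique_tickets
-- ===== SOURCE A (Python) =====
-- def get_unique_tickets(tickets: dict[int, str]) -> dict[int, list[str]]:
--     ticket_set = set()  # множество уникальных тикетов
--     unique_tickets: dict[int, list[str]] = {}
--     # сортируем по ключам на всякий случай и потому что умеем
--     tickets = dict(sorted(tickets.items()))
--     # перебор по всем ключам словаря
--     for key in tickets.keys():
--         current_type_tickets = []
--         # и всем элементам в значениях
--         for ticket in tickets[key]:
--             # если такой тикет еще не встречался
--             if ticket not in ticket_set: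
--                 ticket_set.add(ticket)
--                 current_type_tickets.append(ticket)
--         unique_tickets[key] = current_type_tickets
--     return unique_tickets
-- ===== SOURCE B (Python) =====
-- def get_unique_tickets(tickets: dict[int, str]) -> dict[int, list[str]]:
--     items = sorted(tickets.items())
--     # pass 1: map each ticket to the key of its earliest global occurrence
--     first: dict[str, int] = {}
--     for key, values in items:
--         for ticket in values:
--             if ticket not in first:
--                 first[ticket] = key
--     # pass 2: seed every key (in sorted order) with an empty bucket, then replay
--     result: dict[int, list[str]] = {key: [] for key, _ in items}
--     for ticket, key in first.items():
--         result[key].append(ticket)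
--     return result
-- ===== Notes on version B (the rewrite author's own statement) =====
-- stated objective: alternative
-- what changed: A fuses the seen-set membership test and bucket building in one nested loop with a growing set; B makes two passes: it first builds a first-occurrence index dict (ticket -> key of earliest occurrence), then seeds every sorted key with an empty bucket and fills the buckets by replaying the index.
import Mathlib
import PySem

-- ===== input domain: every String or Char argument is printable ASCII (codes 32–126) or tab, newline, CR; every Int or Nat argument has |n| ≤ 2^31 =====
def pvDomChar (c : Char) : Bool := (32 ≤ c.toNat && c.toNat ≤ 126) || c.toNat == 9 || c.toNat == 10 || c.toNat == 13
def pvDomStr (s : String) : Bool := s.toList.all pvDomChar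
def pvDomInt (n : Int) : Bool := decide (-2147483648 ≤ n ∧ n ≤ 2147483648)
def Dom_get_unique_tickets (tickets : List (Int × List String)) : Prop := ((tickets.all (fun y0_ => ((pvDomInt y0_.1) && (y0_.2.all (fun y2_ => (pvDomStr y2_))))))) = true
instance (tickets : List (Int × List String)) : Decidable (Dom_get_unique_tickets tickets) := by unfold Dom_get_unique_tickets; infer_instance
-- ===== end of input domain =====

-- B replaces A's fused membership-check-and-bucket loop by two passes: a first-occurrence
-- index built once, then buckets seeded empty and filled by replaying the index (objective:
-- alternative decomposition, same asymptotic cost).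

-- ===== PORT A =====
-- 'sorted(tickets.items())' is ported as a sort by key: a Python dict has distinct keys,
-- so tuple comparison never reaches the second component (Pre_ restricts to distinct keys).
def get_unique_tickets (tickets : List (Int × List String)) : List (Int × List String) :=
  let items := PySem.List.sorted tickets (fun p => p.1)
  (items.foldl
    (fun (st : PySem.Set String × PySem.Dict Int (List String)) kv =>
      let inner := kv.2.foldl
        (fun (st2 : PySem.Set String × List String) t =>
          if PySem.Set.contains st2.1 t then st2
          else (PySem.Set.add st2.1 t, st2.2 ++ [t]))
        (st.1, ([] : List String))
      (inner.1, st.2.insert kv.1 inner.2))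
    (PySem.Set.empty, PySem.Dict.empty)).2.items

-- ===== PORT B =====
-- result[key].append(t): the key is always present (every bucket is seeded, and every key
-- recorded in `first` is an item key), so Dict.modify with default [] is exact there.
def get_unique_tickets_alt (tickets : List (Int × List String)) : List (Int × List String) :=
  let items := PySem.List.sorted tickets (fun p => p.1)
  let first : PySem.Dict String Int := items.foldl
    (fun d kv => kv.2.foldl
      (fun (d : PySem.Dict String Int) t => if d.contains t then d else d.insert t kv.1) d)
    PySem.Dict.empty
  let result : PySem.Dict Int (List String) := items.foldl
    (fun (r : PySem.Dict Int (List String)) kv => r.insert kv.1 ([] : List String))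
    PySem.Dict.empty
  (first.items.foldl
    (fun (r : PySem.Dict Int (List String)) p => r.modify p.2 [] (fun l => l ++ [p.1]))
    result).items

-- ===== PRECONDITION & SPEC =====
-- Pre_ excludes association lists with duplicate keys: they do not represent any Python
-- dict (the function's parameter type is dict[int, ...]), so no behaviour is specified there.
def Pre_get_unique_tickets (tickets : List (Int × List String)) : Prop :=
  (tickets.map Prod.fst).Nodup
instance (tickets : List (Int × List String)) : Decidable (Pre_get_unique_tickets tickets) := by
  unfold Pre_get_unique_tickets; infer_instance
def pvWitness_get_unique_tickets : (List (Int × List String)) :=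
  [(2, ["a", "b"]), (1, ["a", "c"])]
def Spec_get_unique_tickets (tickets : List (Int × List String)) (out : List (Int × List String)) : Prop := out = get_unique_tickets_alt tickets
instance (tickets : List (Int × List String)) (out : List (Int × List String)) : Decidable (Spec_get_unique_tickets tickets out) := by unfold Spec_get_unique_tickets; infer_instance

-- ===== CLAIM (what is proved, stated in full; the proofs are below) =====
def Claim_equal_get_unique_tickets : Prop := ∀ (tickets : List (Int × List String)), Dom_get_unique_tickets tickets → Pre_get_unique_tickets tickets → Spec_get_unique_tickets tickets (get_unique_tickets tickets)

-- ===== LEMMAS AND PROOFS =====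

def pvKeep (vals : List String) (s : List String) : List String :=
  match vals with
  | [] => []
  | t :: ts => if s.contains t then pvKeep ts s else t :: pvKeep ts (s ++ [t])

theorem pv_inner_eq (vals : List String) (s : List String) (acc : List String) :
    vals.foldl
      (fun (st2 : PySem.Set String × List String) t =>
        if PySem.Set.contains st2.1 t then st2
        else (PySem.Set.add st2.1 t, st2.2 ++ [t]))
      (s, acc)
    = (s ++ pvKeep vals s, acc ++ pvKeep vals s) := by
  induction vals generalizing s acc with
  | nil => simp [pvKeep]
  | cons t ts ih =>
    rw [List.foldl_cons]
    show List.foldl _ (if PySem.Set.contains s t then (s, acc) else (PySem.Set.add s t, acc ++ [t])) ts = _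
    by_cases h : PySem.Set.contains s t
    · rw [if_pos h, ih]
      have hm : t ∈ s := by simpa using h
      simp [pvKeep, hm]
    · rw [if_neg h]
      have hm : t ∉ s := by simpa using h
      have hadd : PySem.Set.add s t = s ++ [t] := by simp [PySem.Set.add, PySem.Set.contains, hm]
      rw [hadd, ih]
      simp [pvKeep, hm, List.append_assoc]

def pvBuildA (items : List (Int × List String)) (s : List String) : List (Int × List String) :=
  match items with
  | [] => []
  | kv :: rest => (kv.1, pvKeep kv.2 s) :: pvBuildA rest (s ++ pvKeep kv.2 s)

theorem pv_A_outer' (items : List (Int × List String)) (s : List String)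
    (d : PySem.Dict Int (List String))
    (hnd : (items.map Prod.fst).Nodup)
    (hfresh : ∀ k ∈ items.map Prod.fst, d.contains k = false) :
    ((items.foldl
      (fun (st : List String × PySem.Dict Int (List String)) kv =>
        (st.1 ++ pvKeep kv.2 st.1, st.2.insert kv.1 (pvKeep kv.2 st.1)))
      (s, d)).2).items = d.items ++ pvBuildA items s := by
  induction items generalizing s d with
  | nil => simp [pvBuildA]
  | cons kv rest ih =>
    have hnd' : (rest.map Prod.fst).Nodup := (List.nodup_cons.mp (by simpa using hnd)).2
    have hnotin : kv.1 ∉ rest.map Prod.fst := (List.nodup_cons.mp (by simpa using hnd)).1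
    have hf0 : d.contains kv.1 = false := hfresh kv.1 (by simp)
    have hins : d.insert kv.1 (pvKeep kv.2 s) = PySem.Dict.mk (d.items ++ [(kv.1, pvKeep kv.2 s)]) := by
      simp [PySem.Dict.insert, hf0]
    rw [List.foldl_cons]
    show ((rest.foldl _ (s ++ pvKeep kv.2 s, d.insert kv.1 (pvKeep kv.2 s))).2).items = _
    rw [hins, ih (s ++ pvKeep kv.2 s) _ hnd' ?hf]
    · simp [pvBuildA]
    case hf =>
      intro k hk
      have h1 : d.contains k = false := hfresh k (by simp [hk])
      have h2 : kv.1 ≠ k := fun he => hnotin (he ▸ hk)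
      simp [PySem.Dict.contains, List.any_append] at h1 ⊢
      exact ⟨h1, h2⟩

theorem pv_A_outer (items : List (Int × List String)) (s : List String)
    (d : PySem.Dict Int (List String))
    (hnd : (items.map Prod.fst).Nodup)
    (hfresh : ∀ k ∈ items.map Prod.fst, d.contains k = false) :
    ((items.foldl
      (fun (st : PySem.Set String × PySem.Dict Int (List String)) kv =>
        let inner := kv.2.foldl
          (fun (st2 : PySem.Set String × List String) t =>
            if PySem.Set.contains st2.1 t then st2
            else (PySem.Set.add st2.1 t, st2.2 ++ [t]))
          (st.1, ([] : List String))
        (inner.1, st.2.insert kv.1 inner.2))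
      (s, d)).2).items = d.items ++ pvBuildA items s := by
  have hfun : (fun (st : PySem.Set String × PySem.Dict Int (List String)) (kv : Int × List String) =>
        let inner := kv.2.foldl
          (fun (st2 : PySem.Set String × List String) t =>
            if PySem.Set.contains st2.1 t then st2
            else (PySem.Set.add st2.1 t, st2.2 ++ [t]))
          (st.1, ([] : List String))
        (inner.1, st.2.insert kv.1 inner.2))
      = (fun (st : List String × PySem.Dict Int (List String)) (kv : Int × List String) =>
        (st.1 ++ pvKeep kv.2 st.1, st.2.insert kv.1 (pvKeep kv.2 st.1))) := by
    funext st kv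
    simp only [pv_inner_eq, List.nil_append]
  rw [hfun]
  exact pv_A_outer' items s d hnd hfresh

def pvFlat (items : List (Int × List String)) : List (String × Int) :=
  items.flatMap (fun kv => kv.2.map (fun t => (t, kv.1)))

def pvFOcc (l : List (String × Int)) (s : List String) : List (String × Int) :=
  match l with
  | [] => []
  | p :: ps => if s.contains p.1 then pvFOcc ps s else p :: pvFOcc ps (s ++ [p.1])

theorem pv_first_flat (items : List (Int × List String)) (d : PySem.Dict String Int) :
    items.foldl
      (fun d kv => kv.2.foldl
        (fun (d : PySem.Dict String Int) t => if d.contains t then d else d.insert t kv.1) d) d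
    = (pvFlat items).foldl
        (fun (d : PySem.Dict String Int) p => if d.contains p.1 then d else d.insert p.1 p.2) d := by
  induction items generalizing d with
  | nil => simp [pvFlat]
  | cons kv rest ih =>
    simp only [pvFlat, List.flatMap_cons, List.foldl_append, List.foldl_cons, List.foldl_map]
    rw [ih]
    rfl

theorem pv_first_items (l : List (String × Int)) (d : PySem.Dict String Int) :
    ((l.foldl
      (fun (d : PySem.Dict String Int) p => if d.contains p.1 then d else d.insert p.1 p.2) d)).items
    = d.items ++ pvFOcc l d.keys := by
  induction l generalizing d with
  | nil => simp [pvFOcc]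
  | cons p ps ih =>
    rw [List.foldl_cons]
    by_cases h : d.contains p.1
    · have hm : p.1 ∈ d.keys := by
        simpa [PySem.Dict.contains, PySem.Dict.keys, List.any_map] using h
      rw [if_pos h, ih]
      simp [pvFOcc, hm]
    · have hm : p.1 ∉ d.keys := by
        simpa [PySem.Dict.contains, PySem.Dict.keys, List.any_map] using h
      have hins : d.insert p.1 p.2 = PySem.Dict.mk (d.items ++ [(p.1, p.2)]) := by
        simp [PySem.Dict.insert, (by simpa using h : d.contains p.1 = false)]
      rw [if_neg h, hins, ih]
      have hkeys : (PySem.Dict.mk (d.items ++ [(p.1, p.2)])).keys = d.keys ++ [p.1] := by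
        simp [PySem.Dict.keys]
      rw [hkeys]
      have hcond : d.keys.contains p.1 = false := by simpa using hm
      show _ = d.items ++ (if d.keys.contains p.1 then pvFOcc ps d.keys else p :: pvFOcc ps (d.keys ++ [p.1]))
      rw [hcond]
      simp [List.append_assoc]

theorem pv_seed_items (items : List (Int × List String)) (r : PySem.Dict Int (List String))
    (hnd : (items.map Prod.fst).Nodup)
    (hfresh : ∀ k ∈ items.map Prod.fst, r.contains k = false) :
    (items.foldl (fun (r : PySem.Dict Int (List String)) kv => r.insert kv.1 ([] : List String)) r).items
    = r.items ++ items.map (fun kv => (kv.1, ([] : List String))) := by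
  induction items generalizing r with
  | nil => simp
  | cons kv rest ih =>
    have hnd' : (rest.map Prod.fst).Nodup := (List.nodup_cons.mp (by simpa using hnd)).2
    have hnotin : kv.1 ∉ rest.map Prod.fst := (List.nodup_cons.mp (by simpa using hnd)).1
    have hf0 : r.contains kv.1 = false := hfresh kv.1 (by simp)
    have hins : r.insert kv.1 ([] : List String) = PySem.Dict.mk (r.items ++ [(kv.1, [])]) := by
      simp [PySem.Dict.insert, hf0]
    rw [List.foldl_cons, hins, ih _ hnd' ?hf]
    · simp
    case hf =>
      intro k hk
      have h1 : r.contains k = false := hfresh k (by simp [hk])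
      have h2 : kv.1 ≠ k := fun he => hnotin (he ▸ hk)
      simp [PySem.Dict.contains, List.any_append] at h1 ⊢
      exact ⟨h1, h2⟩

theorem pv_getD_nodup (L : List (Int × List String)) (k : Int) (v : List String) :
    (L.map Prod.fst).Nodup → (k, v) ∈ L → (PySem.Dict.mk L).getD k [] = v := by
  induction L with
  | nil => intro _ hmem; simp at hmem
  | cons q qs ih =>
    intro hnd hmem
    rcases List.mem_cons.mp hmem with h | h
    · simp [PySem.Dict.getD, PySem.Dict.get?, ← h]
    · have hne : q.1 ≠ k := by
        intro he
        exact (List.nodup_cons.mp (by simpa using hnd)).1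
          ((he ▸ (List.mem_map_of_mem h : (k,v).1 ∈ _)))
      have := ih (List.nodup_cons.mp (by simpa using hnd)).2 h
      simpa [PySem.Dict.getD, PySem.Dict.get?, List.find?_cons, hne] using this

theorem pv_modify_items (r : PySem.Dict Int (List String)) (k : Int) (x : String)
    (hnd : r.keys.Nodup) (hc : r.contains k = true) :
    (r.modify k [] (fun l => l ++ [x])).items
    = r.items.map (fun kv => if kv.1 = k then (kv.1, kv.2 ++ [x]) else kv) := by
  show (r.insert k ((r.getD k []) ++ [x])).items = _
  have : r.insert k ((r.getD k []) ++ [x])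
      = PySem.Dict.mk (r.items.map (fun p => if p.1 == k then (k, (r.getD k []) ++ [x]) else p)) := by
    simp [PySem.Dict.insert, hc]
  rw [this]
  show r.items.map _ = _
  apply List.map_congr_left
  intro q hq
  by_cases hqk : q.1 = k
  · have hg : r.getD k [] = q.2 := by
      apply pv_getD_nodup r.items k q.2 hnd
      simpa [← hqk] using hq
    simp [hqk, hg]
  · simp [hqk]

theorem pv_replay_items (F : List (String × Int)) (r : PySem.Dict Int (List String))
    (hnd : r.keys.Nodup)
    (hmem : ∀ p ∈ F, r.contains p.2 = true) :
    (F.foldl (fun (r : PySem.Dict Int (List String)) p => r.modify p.2 [] (fun l => l ++ [p.1])) r).items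
    = r.items.map (fun kv => (kv.1, kv.2 ++ (F.filter (fun p => p.2 == kv.1)).map Prod.fst)) := by
  induction F generalizing r with
  | nil => simp
  | cons p F' ih =>
    have hc : r.contains p.2 = true := hmem p (by simp)
    have hitems' : (r.modify p.2 [] (fun l => l ++ [p.1])).items
        = r.items.map (fun kv => if kv.1 = p.2 then (kv.1, kv.2 ++ [p.1]) else kv) :=
      pv_modify_items r p.2 p.1 hnd hc
    have hkeys' : (r.modify p.2 [] (fun l => l ++ [p.1])).keys = r.keys := by
      simp only [PySem.Dict.keys, hitems', List.map_map]
      apply List.map_congr_left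
      intro q _
      by_cases hqk : q.1 = p.2 <;> simp [hqk]
    have hcont' : ∀ k', (r.modify p.2 [] (fun l => l ++ [p.1])).contains k' = r.contains k' := by
      intro k'
      simp only [PySem.Dict.contains, hitems', List.any_map]
      apply congrArg
      funext q
      by_cases hqk : q.1 = p.2 <;> simp [hqk]
    rw [List.foldl_cons, ih _ (hkeys' ▸ hnd) (fun q hq => (hcont' q.2).trans (hmem q (by simp [hq])))]
    rw [hitems', List.map_map]
    apply List.map_congr_left
    intro kv _
    by_cases hk : kv.1 = p.2
    · simp [hk, List.append_assoc]
    · have : ¬ (p.2 == kv.1) = true := by simpa using fun he => hk he.symm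
      simp [hk, this]

theorem pv_fOcc_append (xs ys : List (String × Int)) (s : List String) :
    pvFOcc (xs ++ ys) s = pvFOcc xs s ++ pvFOcc ys (s ++ (pvFOcc xs s).map Prod.fst) := by
  induction xs generalizing s with
  | nil => simp [pvFOcc]
  | cons p xs' ih =>
    by_cases h : p.1 ∈ s
    · simp [pvFOcc, h, ih]
    · simp [pvFOcc, h, ih, List.append_assoc]

theorem pv_fOcc_map_pair (vals : List String) (k : Int) (s : List String) :
    pvFOcc (vals.map (fun t => (t, k))) s = (pvKeep vals s).map (fun t => (t, k)) := by
  induction vals generalizing s with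
  | nil => simp [pvFOcc, pvKeep]
  | cons t ts ih =>
    by_cases h : t ∈ s
    · simp [pvFOcc, pvKeep, h, ih]
    · simp [pvFOcc, pvKeep, h, ih]

theorem pv_fOcc_subset (l : List (String × Int)) (s : List String) :
    ∀ p ∈ pvFOcc l s, p ∈ l := by
  induction l generalizing s with
  | nil => simp [pvFOcc]
  | cons q l' ih =>
    intro p hp
    by_cases h : q.1 ∈ s
    · have hb : s.contains q.1 = true := by simpa using h
      simp only [pvFOcc] at hp
      rw [if_pos hb] at hp
      exact List.mem_cons_of_mem _ (ih s p hp)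
    · have hb : ¬ s.contains q.1 = true := by simpa using h
      simp only [pvFOcc] at hp
      rw [if_neg hb] at hp
      rcases List.mem_cons.mp hp with h' | h'
      · exact h' ▸ List.mem_cons_self
      · exact List.mem_cons_of_mem _ (ih _ p h')

theorem pv_flat_snd (items : List (Int × List String)) (p : String × Int)
    (hp : p ∈ pvFlat items) : p.2 ∈ items.map Prod.fst := by
  simp only [pvFlat, List.mem_flatMap] at hp
  rcases hp with ⟨kv, hkv, hmem⟩
  rcases List.mem_map.mp hmem with ⟨t, _, he⟩
  rw [← he]
  exact List.mem_map_of_mem hkv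

theorem pv_buildA_eq (items : List (Int × List String)) (s : List String)
    (hnd : (items.map Prod.fst).Nodup) :
    pvBuildA items s
    = items.map (fun kv =>
        (kv.1, ((pvFOcc (pvFlat items) s).filter (fun p => p.2 == kv.1)).map Prod.fst)) := by
  induction items generalizing s with
  | nil => simp [pvBuildA, pvFlat, pvFOcc]
  | cons kv rest ih =>
    have hnd' : (rest.map Prod.fst).Nodup := (List.nodup_cons.mp (by simpa using hnd)).2
    have hnotin : kv.1 ∉ rest.map Prod.fst := (List.nodup_cons.mp (by simpa using hnd)).1
    have hflat : pvFlat (kv :: rest) = kv.2.map (fun t => (t, kv.1)) ++ pvFlat rest := by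
      simp [pvFlat]
    have hsplit : pvFOcc (pvFlat (kv :: rest)) s
        = (pvKeep kv.2 s).map (fun t => (t, kv.1))
          ++ pvFOcc (pvFlat rest) (s ++ pvKeep kv.2 s) := by
      rw [hflat, pv_fOcc_append, pv_fOcc_map_pair]
      simp [List.map_map, Function.comp_def]
    have hRnil : ∀ k', k' ∈ (kv :: rest).map Prod.fst → k' ∉ rest.map Prod.fst →
        (pvFOcc (pvFlat rest) (s ++ pvKeep kv.2 s)).filter (fun p => p.2 == k') = [] := by
      intro k' _ hk'
      apply List.filter_eq_nil_iff.mpr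
      intro p hp
      have : p.2 ∈ rest.map Prod.fst :=
        pv_flat_snd rest p (pv_fOcc_subset _ _ p hp)
      simp only [beq_iff_eq]
      intro he
      exact hk' (he ▸ this)
    rw [pvBuildA, hsplit]
    simp only [List.map_cons]
    rw [List.cons_eq_cons]
    constructor
    · -- head bucket
      rw [List.filter_append, hRnil kv.1 (by simp) hnotin]
      simp [List.filter_map, Function.comp_def]
    · -- tail buckets
      rw [ih (s ++ pvKeep kv.2 s) hnd']
      apply List.map_congr_left
      intro kv' hkv'
      have hne : kv.1 ≠ kv'.1 := fun he => hnotin (he ▸ List.mem_map_of_mem hkv')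
      rw [List.filter_append]
      have hKnil : ((pvKeep kv.2 s).map (fun t => (t, kv.1))).filter (fun p => p.2 == kv'.1) = [] := by
        apply List.filter_eq_nil_iff.mpr
        intro p hp
        rcases List.mem_map.mp hp with ⟨t, _, he⟩
        simp [← he, hne]
      rw [hKnil, List.nil_append]

theorem pv_final (tickets : List (Int × List String))
    (hpre : (tickets.map Prod.fst).Nodup) :
    get_unique_tickets tickets = get_unique_tickets_alt tickets := by
  have hnd : ((PySem.List.sorted tickets (fun p => p.1) false).map Prod.fst).Nodup :=
    (((PySem.List.sorted_perm tickets (fun p => p.1) false).map Prod.fst).nodup_iff).mpr hpre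
  set items := PySem.List.sorted tickets (fun p => p.1) false with hitems
  have haveA : get_unique_tickets tickets = pvBuildA items [] := by
    show ((items.foldl
      (fun (st : PySem.Set String × PySem.Dict Int (List String)) kv =>
        let inner := kv.2.foldl
          (fun (st2 : PySem.Set String × List String) t =>
            if PySem.Set.contains st2.1 t then st2
            else (PySem.Set.add st2.1 t, st2.2 ++ [t]))
          (st.1, ([] : List String))
        (inner.1, st.2.insert kv.1 inner.2))
      (([] : List String), PySem.Dict.empty)).2).items = _
    rw [pv_A_outer items [] PySem.Dict.empty hnd (fun k _ => rfl)]
    rfl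
  have hfirst : (items.foldl
      (fun d kv => kv.2.foldl
        (fun (d : PySem.Dict String Int) t => if d.contains t then d else d.insert t kv.1) d)
      PySem.Dict.empty).items = pvFOcc (pvFlat items) [] := by
    rw [pv_first_flat, pv_first_items]
    rfl
  have hseed : (items.foldl
      (fun (r : PySem.Dict Int (List String)) kv => r.insert kv.1 ([] : List String))
      PySem.Dict.empty).items = items.map (fun kv => (kv.1, ([] : List String))) := by
    rw [pv_seed_items items _ hnd (fun k _ => rfl)]
    rfl
  have hndk : (items.foldl
      (fun (r : PySem.Dict Int (List String)) kv => r.insert kv.1 ([] : List String))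
      PySem.Dict.empty).keys.Nodup := by
    show (((items.foldl
      (fun (r : PySem.Dict Int (List String)) kv => r.insert kv.1 ([] : List String))
      PySem.Dict.empty).items).map Prod.fst).Nodup
    rw [hseed, List.map_map]
    simpa [Function.comp_def] using hnd
  have hmem : ∀ p ∈ pvFOcc (pvFlat items) [],
      (items.foldl
        (fun (r : PySem.Dict Int (List String)) kv => r.insert kv.1 ([] : List String))
        PySem.Dict.empty).contains p.2 = true := by
    intro p hp
    have h2 : p.2 ∈ items.map Prod.fst := pv_flat_snd items p (pv_fOcc_subset _ _ p hp)
    show (((items.foldl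
      (fun (r : PySem.Dict Int (List String)) kv => r.insert kv.1 ([] : List String))
      PySem.Dict.empty).items).any (fun q => q.1 == p.2)) = true
    rw [hseed]
    rcases List.mem_map.mp h2 with ⟨kv, hkv, he⟩
    apply List.any_eq_true.mpr
    exact ⟨(kv.1, []), List.mem_map_of_mem hkv, by simp [he]⟩
  have haveB : get_unique_tickets_alt tickets = pvBuildA items [] := by
    show (((items.foldl
        (fun d kv => kv.2.foldl
          (fun (d : PySem.Dict String Int) t => if d.contains t then d else d.insert t kv.1) d)
        PySem.Dict.empty).items).foldl
        (fun (r : PySem.Dict Int (List String)) p => r.modify p.2 [] (fun l => l ++ [p.1]))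
        (items.foldl
          (fun (r : PySem.Dict Int (List String)) kv => r.insert kv.1 ([] : List String))
          PySem.Dict.empty)).items = _
    rw [hfirst, pv_replay_items _ _ hndk hmem, hseed, List.map_map,
      pv_buildA_eq items [] hnd]
    apply List.map_congr_left
    intro kv _
    simp
  rw [haveA, haveB]

-- ===== VERDICT (by name: the statement is the Claim_ definition above) =====
theorem get_unique_tickets_spec : Claim_equal_get_unique_tickets := by
  intro tickets _ hpre
  unfold Spec_get_unique_tickets
  unfold Pre_get_unique_tickets at hpre
  exact pv_final tickets hpre
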